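-- pv_equiv track=rewrite | github.com/kushalpokharel/cryptanalysis-504 | cryptanalysis/hill.py | combination_of_4
-- ===== SOURCE A (Python) =====
-- from typing import Generator, List
--
-- def combination_of_4(n:int)->Generator:
--     def _helper():
--         for i in range(n):
--             for j in range(n):
--                 for k in range(n):
--                     for l in range(n):
--                         yield [i,j,k,l]
--
--     yield from _helper()
-- ===== SOURCE B (Python) =====
-- def combination_of_4(n: int):
--     # Single loop over a linear counter; decode the four mixed-radix digits.
--     if n > 0:
--         n2 = n * n
--         n3 = n2 * n
--         for m in range(n3 * n):
--             yield [m // n3, (m // n2) % n, (m // n) % n, m % n]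
-- ===== Notes on version B (the rewrite author's own statement) =====
-- stated objective: alternative
-- what changed: Replaces the four nested loops by a single loop over a linear counter m in range(n**4), decoding the four digits of m in base n; same lexicographic order, guarded by n > 0 so negative n yields nothing like the original.
import Mathlib
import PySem

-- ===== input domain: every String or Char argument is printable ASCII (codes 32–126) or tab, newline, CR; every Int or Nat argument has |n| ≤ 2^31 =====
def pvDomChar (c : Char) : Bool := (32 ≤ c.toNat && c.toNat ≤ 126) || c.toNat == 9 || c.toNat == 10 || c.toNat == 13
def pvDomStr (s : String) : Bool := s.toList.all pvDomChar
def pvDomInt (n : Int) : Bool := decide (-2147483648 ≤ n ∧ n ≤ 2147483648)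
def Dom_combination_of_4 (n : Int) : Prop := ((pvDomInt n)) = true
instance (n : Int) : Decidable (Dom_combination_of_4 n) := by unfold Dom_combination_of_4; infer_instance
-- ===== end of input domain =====

-- B replaces the four nested loops by one loop over a linear counter with mixed-radix
-- digit decoding (same order, same cost); equivalence proved for all n.

-- ===== PORT A =====
-- nested generators: for i/j/k/l in range(n): yield [i,j,k,l]
def combination_of_4 (n : Int) : List (List Int) :=
  (PySem.List.pyRange 0 n 1).flatMap (fun i =>
    (PySem.List.pyRange 0 n 1).flatMap (fun j =>
      (PySem.List.pyRange 0 n 1).flatMap (fun k =>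
        (PySem.List.pyRange 0 n 1).map (fun l => [i, j, k, l]))))

-- ===== PORT B =====
-- if n > 0: for m in range(n3*n): yield [m//n3, (m//n2)%n, (m//n)%n, m%n]
def combination_of_4_alt (n : Int) : List (List Int) :=
  if 0 < n then
    let n2 := n * n
    let n3 := n2 * n
    (PySem.List.pyRange 0 (n3 * n) 1).map (fun m =>
      [PySem.Int.floordiv m n3,
       PySem.Int.mod (PySem.Int.floordiv m n2) n,
       PySem.Int.mod (PySem.Int.floordiv m n) n,
       PySem.Int.mod m n])
  else []

-- ===== PRECONDITION & SPEC =====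
def Spec_combination_of_4 (n : Int) (out : List (List Int)) : Prop := out = combination_of_4_alt n
instance (n : Int) (out : List (List Int)) : Decidable (Spec_combination_of_4 n out) := by unfold Spec_combination_of_4; infer_instance

-- ===== CLAIM (what is proved, stated in full; the proofs are below) =====
def Claim_equal_combination_of_4 : Prop := ∀ (n : Int), Dom_combination_of_4 n → Spec_combination_of_4 n (combination_of_4 n)

-- ===== LEMMAS AND PROOFS =====

-- Splitting range (a*N) into a blocks of N: the linear counter as outer digit × offset.
lemma pv_range_mul_flatMap {α : Type} (N a : Nat) (g : Nat → α) :
    (List.range (a * N)).map g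
      = (List.range a).flatMap (fun i => (List.range N).map (fun j => g (i * N + j))) := by
  induction a with
  | zero => simp
  | succ a ih =>
      have h1 : (a + 1) * N = a * N + N := by ring
      rw [h1, List.range_add, List.map_append, ih, List.range_succ, List.flatMap_append]
      simp [List.map_map, Function.comp]

-- Decoding the four base-N digits of ((i*N+j)*N+k)*N+l.
lemma pv_decode (N i j k l : Nat) (hj : j < N) (hk : k < N) (hl : l < N) :
    (((i * N + j) * N + k) * N + l) / (N * N * N) = i ∧
    ((((i * N + j) * N + k) * N + l) / (N * N)) % N = j ∧
    ((((i * N + j) * N + k) * N + l) / N) % N = k ∧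
    (((i * N + j) * N + k) * N + l) % N = l := by
  have hN : 0 < N := by omega
  have e1 : ((i * N + j) * N + k) * N + l = N * ((i * N + j) * N + k) + l := by ring
  have hdiv1 : (((i * N + j) * N + k) * N + l) / N = (i * N + j) * N + k := by
    rw [e1, Nat.mul_add_div hN, Nat.div_eq_of_lt hl, Nat.add_zero]
  have e2 : (i * N + j) * N + k = N * (i * N + j) + k := by ring
  have hdiv2 : ((i * N + j) * N + k) / N = i * N + j := by
    rw [e2, Nat.mul_add_div hN, Nat.div_eq_of_lt hk, Nat.add_zero]
  have e3 : i * N + j = N * i + j := by ring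
  have hdiv3 : (i * N + j) / N = i := by
    rw [e3, Nat.mul_add_div hN, Nat.div_eq_of_lt hj, Nat.add_zero]
  have hd12 : (((i * N + j) * N + k) * N + l) / (N * N) = i * N + j := by
    rw [← Nat.div_div_eq_div_mul, hdiv1, hdiv2]
  have hd123 : (((i * N + j) * N + k) * N + l) / (N * N * N) = i := by
    rw [← Nat.div_div_eq_div_mul, hd12, hdiv3]
  refine ⟨hd123, ?_, ?_, ?_⟩
  · rw [hd12, e3, Nat.mul_add_mod, Nat.mod_eq_of_lt hj]
  · rw [hdiv1, e2, Nat.mul_add_mod, Nat.mod_eq_of_lt hk]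
  · rw [e1, Nat.mul_add_mod, Nat.mod_eq_of_lt hl]

-- The whole equivalence at the Nat level: the flat counter loop equals the nested loops.
lemma pv_nat_equiv (N : Nat) :
    (List.range (N * (N * (N * N)))).map (fun m =>
        ([((m / (N * N * N) : Nat) : Int),
          (((m / (N * N)) % N : Nat) : Int),
          (((m / N) % N : Nat) : Int),
          ((m % N : Nat) : Int)] : List Int))
    = (List.range N).flatMap (fun (i : Nat) => (List.range N).flatMap (fun (j : Nat) =>
        (List.range N).flatMap (fun (k : Nat) => (List.range N).map (fun (l : Nat) =>
          ([(i : Int), (j : Int), (k : Int), (l : Int)] : List Int))))) := by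
  rw [pv_range_mul_flatMap (N * (N * N)) N]
  refine List.flatMap_congr ?_
  intro i _
  rw [pv_range_mul_flatMap (N * N) N]
  refine List.flatMap_congr ?_
  intro j hj
  rw [pv_range_mul_flatMap N N]
  refine List.flatMap_congr ?_
  intro k hk
  refine List.map_congr_left ?_
  intro l hl
  rw [List.mem_range] at hj hk hl
  have hm : i * (N * (N * N)) + (j * (N * N) + (k * N + l))
      = ((i * N + j) * N + k) * N + l := by ring
  rw [hm]
  obtain ⟨h1, h2, h3, h4⟩ := pv_decode N i j k l hj hk hl
  rw [h1, h2, h3, h4]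

-- ===== VERDICT (by name: the statement is the Claim_ definition above) =====
theorem combination_of_4_spec : Claim_equal_combination_of_4 := by
  intro n _
  unfold Spec_combination_of_4 combination_of_4 combination_of_4_alt
  by_cases hn : 0 < n
  · rw [if_pos hn]
    set N : Nat := n.toNat with hNdef
    have hcast : n = (N : Int) := (Int.toNat_of_nonneg (le_of_lt hn)).symm
    -- B side: rewrite into the Nat-level flat map
    have hprod : (n * n) * n * n = ((N * (N * (N * N)) : Nat) : Int) := by
      rw [hcast]; push_cast; ring
    have hb :
        (PySem.List.pyRange 0 ((n * n) * n * n) 1).map (fun m =>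
          [PySem.Int.floordiv m ((n * n) * n),
           PySem.Int.mod (PySem.Int.floordiv m (n * n)) n,
           PySem.Int.mod (PySem.Int.floordiv m n) n,
           PySem.Int.mod m n])
        = (List.range (N * (N * (N * N)))).map (fun m =>
            ([((m / (N * N * N) : Nat) : Int),
              (((m / (N * N)) % N : Nat) : Int),
              (((m / N) % N : Nat) : Int),
              ((m % N : Nat) : Int)] : List Int)) := by
      rw [hprod, PySem.List.pyRange_one]
      simp only [Int.sub_zero, Int.toNat_natCast, List.map_map]
      refine List.map_congr_left ?_
      intro m _
      have h2 : ((N : Int)) * N = ((N * N : Nat) : Int) := by push_cast; ring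
      have h3' : ((N * N : Nat) : Int) * N = ((N * N * N : Nat) : Int) := by push_cast; ring
      simp only [Function.comp_apply, Int.zero_add, hcast, h2, h3',
        PySem.Int.floordiv_natCast, PySem.Int.mod_natCast]
    -- A side: each pyRange over n is List.range N under the cast
    have ha : ∀ {β : Type} (f : Int → List β),
        (PySem.List.pyRange 0 n 1).flatMap f
          = (List.range N).flatMap (fun (i : Nat) => f (i : Int)) := by
      intro β f
      rw [hcast, PySem.List.pyRange_one]
      simp [List.flatMap_map]
    have hamap : ∀ (f : Int → List Int),
        (PySem.List.pyRange 0 n 1).map f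
          = (List.range N).map (fun (i : Nat) => f (i : Int)) := by
      intro f
      rw [hcast, PySem.List.pyRange_one]
      simp [List.map_map, Function.comp_def]
    simp only [ha, hamap, hb, pv_nat_equiv]
  · rw [if_neg hn]
    have h0 : PySem.List.pyRange 0 n 1 = [] := PySem.List.pyRange_one_eq_nil (by omega)
    simp [h0]
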